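-- pv_equiv track=rewrite | github.com/shaypal5/pr-agent-context | src/pr_agent_context/github/workflow_jobs.py | _group_step_blocks
-- ===== SOURCE A (Python) =====
-- def _group_step_blocks(lines: list[str]) -> list[tuple[str, list[str]]]:
--     blocks: list[tuple[str, list[str]]] = []
--     current_step: str | None = None
--     current_lines: list[str] = []
--
--     for line in lines:
--         step_name = _extract_grouped_step_name(line)
--         if step_name is not None:
--             if current_step is not None:
--                 blocks.append((current_step, current_lines))
--             current_step = step_name
--             current_lines = [line]
--             continue
--
--         if current_step is None:
--             continue
--
--         if line.strip() == "##[endgroup]":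
--             current_lines.append(line)
--             blocks.append((current_step, current_lines))
--             current_step = None
--             current_lines = []
--             continue
--
--         current_lines.append(line)
--
--     if current_step is not None:
--         blocks.append((current_step, current_lines))
--
--     return blocks
--
-- def _extract_grouped_step_name(line: str) -> str | None:
--     marker = "##[group]Run "
--     if marker not in line:
--         return None
--     return line.split(marker, maxsplit=1)[1].strip() or None
-- ===== SOURCE B (Python) =====
-- def _group_step_blocks(lines: list[str]) -> list[tuple[str, list[str]]]:
--     blocks: list[tuple[str, list[str]]] = []
--     i, n = 0, len(lines)
--     while i < n:
--         name = _extract_grouped_step_name(lines[i])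
--         if name is None:
--             i += 1
--             continue
--         block, nxt = _take_block(lines, i + 1)
--         blocks.append((name, [lines[i]] + block))
--         i = nxt
--     return blocks
--
--
-- def _take_block(lines: list[str], j: int) -> tuple[list[str], int]:
--     """Consume one block body starting at j: stop before the next group header,
--     or just after an ``##[endgroup]`` line (included)."""
--     block: list[str] = []
--     while j < len(lines):
--         line = lines[j]
--         if _extract_grouped_step_name(line) is not None:
--             return block, j
--         block.append(line)
--         j += 1
--         if line.strip() == "##[endgroup]":
--             return block, j
--     return block, j
--
--
-- def _extract_grouped_step_name(line: str) -> str | None: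
--     marker = "##[group]Run "
--     if marker not in line:
--         return None
--     return line.split(marker, maxsplit=1)[1].strip() or None
-- ===== Notes on version B (the rewrite author's own statement) =====
-- stated objective: alternative
-- what changed: Replaces A's single-pass state machine with an optional current-step register by a boundary-driven decomposition: an outer scan finds group headers and a separate block-consumer scans forward to the matching endgroup or the next header and returns the block slice.
import Mathlib
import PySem

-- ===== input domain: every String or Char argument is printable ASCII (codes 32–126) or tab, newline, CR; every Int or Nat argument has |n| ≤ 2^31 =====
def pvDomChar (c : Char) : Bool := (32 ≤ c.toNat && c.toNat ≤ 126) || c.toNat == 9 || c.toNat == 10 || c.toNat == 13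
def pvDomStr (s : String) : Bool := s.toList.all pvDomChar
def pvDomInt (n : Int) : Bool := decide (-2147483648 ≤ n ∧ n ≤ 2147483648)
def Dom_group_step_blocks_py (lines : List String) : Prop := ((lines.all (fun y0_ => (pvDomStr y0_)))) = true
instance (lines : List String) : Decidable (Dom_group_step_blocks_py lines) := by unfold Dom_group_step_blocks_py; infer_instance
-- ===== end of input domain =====

-- B replaces A's one-pass optional-state machine by a boundary-driven decomposition
-- (header scan + separate block consumer); same cost, alternative structure.

-- shared helper: _extract_grouped_step_name (identical in Source A and Source B)
def pvExtract (line : String) : Option String :=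
  let marker : String := "##[group]Run "
  if PySem.Str.isIn marker line = false then none
  else
    -- marker ≠ "", so splitMax? returns some; marker occurs, so index 1 exists
    let parts := (PySem.Str.splitMax? line marker 1).getD []
    let name := PySem.Str.strip ((PySem.List.pyGet? parts 1).getD "")
    if name = "" then none else some name

-- ===== PORT A =====
-- the for-loop as structural recursion over (blocks, current_step, current_lines)
def pvAGo (ls : List String) (blocks : List (String × List String))
    (cs : Option String) (cl : List String) : List (String × List String) :=
  match ls with
  | [] =>
    match cs with
    | none => blocks
    | some s => blocks ++ [(s, cl)]
  | l :: rest =>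
    match pvExtract l with
    | some name =>
      pvAGo rest (match cs with | none => blocks | some s => blocks ++ [(s, cl)]) (some name) [l]
    | none =>
      match cs with
      | none => pvAGo rest blocks none cl
      | some s =>
        if PySem.Str.strip l = "##[endgroup]" then
          pvAGo rest (blocks ++ [(s, cl ++ [l])]) none []
        else
          pvAGo rest blocks (some s) (cl ++ [l])

def group_step_blocks_py (lines : List String) : List (String × List String) :=
  pvAGo lines [] none []

-- ===== PORT B =====
-- _take_block: consume one block body (up to and incl. endgroup, or up to the next header)
def pvTakeBlock : List String → List String × List String
  | [] => ([], [])
  | l :: rest =>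
    if (pvExtract l).isSome then ([], l :: rest)
    else if PySem.Str.strip l = "##[endgroup]" then ([l], rest)
    else
      let p := pvTakeBlock rest
      (l :: p.1, p.2)

theorem pvTakeBlock_len : ∀ ls : List String, (pvTakeBlock ls).2.length ≤ ls.length := by
  intro ls
  induction ls with
  | nil => simp [pvTakeBlock]
  | cons l rest ih =>
    simp only [pvTakeBlock]
    split
    · simp
    · split
      · simp
      · simpa using Nat.le_succ_of_le ih

-- the outer header scan of Source B
def pvAltGo (ls : List String) : List (String × List String) :=
  match ls with
  | [] => []
  | l :: rest =>
    match pvExtract l with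
    | none => pvAltGo rest
    | some name =>
      let p := pvTakeBlock rest
      (name, l :: p.1) :: pvAltGo p.2
termination_by ls.length
decreasing_by
  · simp
  · exact Nat.lt_succ_of_le (pvTakeBlock_len rest)

def group_step_blocks_py_alt (lines : List String) : List (String × List String) :=
  pvAltGo lines

-- ===== PRECONDITION & SPEC =====
def Spec_group_step_blocks_py (lines : List String) (out : List (String × List String)) : Prop := out = group_step_blocks_py_alt lines
instance (lines : List String) (out : List (String × List String)) : Decidable (Spec_group_step_blocks_py lines out) := by unfold Spec_group_step_blocks_py; infer_instance

-- ===== CLAIM (what is proved, stated in full; the proofs are below) =====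
def Claim_equal_group_step_blocks_py : Prop := ∀ (lines : List String), Dom_group_step_blocks_py lines → Spec_group_step_blocks_py lines (group_step_blocks_py lines)

-- ===== LEMMAS AND PROOFS =====

-- the loop invariant: with no open step A continues as B's header scan; with an open
-- step (s, cl) A finishes exactly the block pvTakeBlock delivers, then continues as B.
theorem pvMain : ∀ ls : List String,
    (∀ blocks cl, pvAGo ls blocks none cl = blocks ++ pvAltGo ls) ∧
    (∀ blocks s cl, pvAGo ls blocks (some s) cl =
      blocks ++ (s, cl ++ (pvTakeBlock ls).1) :: pvAltGo (pvTakeBlock ls).2) := by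
  intro ls
  induction ls with
  | nil =>
    constructor
    · intro blocks cl; simp [pvAGo, pvAltGo]
    · intro blocks s cl; simp [pvAGo, pvAltGo, pvTakeBlock]
  | cons l rest ih =>
    obtain ⟨ih1, ih2⟩ := ih
    constructor
    · intro blocks cl
      cases h : pvExtract l with
      | none => simp only [pvAGo, pvAltGo, h]; exact ih1 blocks cl
      | some name =>
        simp only [pvAGo, pvAltGo, h]
        rw [ih2]
        simp
    · intro blocks s cl
      cases h : pvExtract l with
      | none =>
        by_cases he : PySem.Str.strip l = "##[endgroup]"
        · simp only [pvAGo, h, he, if_pos, pvTakeBlock, Option.isSome_none,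
            Bool.false_eq_true, if_false]
          rw [ih1]
          simp
        · simp only [pvAGo, h, he, pvTakeBlock, Option.isSome_none,
            Bool.false_eq_true, if_false]
          rw [ih2]
          simp
      | some name =>
        simp only [pvAGo, h]
        rw [ih2]
        have ht : pvTakeBlock (l :: rest) = ([], l :: rest) := by
          simp [pvTakeBlock, h]
        rw [ht]
        simp only [pvAltGo, h]
        simp

-- ===== VERDICT (by name: the statement is the Claim_ definition above) =====
theorem group_step_blocks_py_spec : Claim_equal_group_step_blocks_py := by
  intro lines _
  unfold Spec_group_step_blocks_py group_step_blocks_py group_step_blocks_py_alt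
  simpa using (pvMain lines).1 [] []
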